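-- pv_equiv track=rewrite | github.com/j-jwolf/graph-miner | main.py | endpoints
-- ===== SOURCE A (Python) =====
-- def endpoints(path, source, target):
-- 	found = False
-- 	tofind = [False, False]
-- 	count = 0
-- 	while(count < len(path) and not found):
-- 		if source in path[count]: tofind[0] = True
-- 		if target in path[count]: tofind[1] = True
-- 		found = tofind[0] and tofind[1]
-- 		count += 1
-- 	return found
-- ===== SOURCE B (Python) =====
-- def endpoints(path, source, target):
-- 	return any(source in e for e in path) and any(target in e for e in path)
-- ===== Notes on version B (the rewrite author's own statement) =====
-- stated objective: simpler
-- what changed: Replaces the stateful while loop with flag list, found variable and counter by two independent short-circuiting existence scans combined with 'and'.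
import Mathlib
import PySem

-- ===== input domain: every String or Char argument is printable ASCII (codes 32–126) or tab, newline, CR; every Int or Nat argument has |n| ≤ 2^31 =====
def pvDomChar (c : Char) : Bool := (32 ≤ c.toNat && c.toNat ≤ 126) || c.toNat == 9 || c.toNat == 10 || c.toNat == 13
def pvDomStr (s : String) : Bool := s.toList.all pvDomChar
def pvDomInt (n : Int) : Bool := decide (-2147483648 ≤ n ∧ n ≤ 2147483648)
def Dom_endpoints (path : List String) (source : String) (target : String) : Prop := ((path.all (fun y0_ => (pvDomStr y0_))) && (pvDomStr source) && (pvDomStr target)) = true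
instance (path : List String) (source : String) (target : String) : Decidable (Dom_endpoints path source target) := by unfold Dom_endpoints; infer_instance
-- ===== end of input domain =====

-- B replaces A's stateful while loop (flag pair, found, counter) by two independent
-- short-circuiting existence scans combined with &&; same return value, chosen for simplicity.

-- ===== PORT A =====
-- the while loop: state is the two tofind flags; the loop exits returning found
-- (= tofind[0] && tofind[1], recomputed each iteration) or falls off the end with found = false
def endpointsLoop (source target : String) : List String → Bool → Bool → Bool
  | [], _, _ => false
  | e :: rest, t0, t1 =>
      let t0 := if PySem.Str.isIn source e then true else t0
      let t1 := if PySem.Str.isIn target e then true else t1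
      if t0 && t1 then true else endpointsLoop source target rest t0 t1

def endpoints (path : List String) (source : String) (target : String) : Bool :=
  endpointsLoop source target path false false

-- ===== PORT B =====
def endpoints_alt (path : List String) (source : String) (target : String) : Bool :=
  (path.any (fun e => PySem.Str.isIn source e)) && (path.any (fun e => PySem.Str.isIn target e))

-- ===== PRECONDITION & SPEC =====
def Spec_endpoints (path : List String) (source : String) (target : String) (out : Bool) : Prop := out = endpoints_alt path source target
instance (path : List String) (source : String) (target : String) (out : Bool) : Decidable (Spec_endpoints path source target out) := by unfold Spec_endpoints; infer_instance

-- ===== CLAIM (what is proved, stated in full; the proofs are below) =====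
def Claim_equal_endpoints : Prop := ∀ (path : List String) (source : String) (target : String), Dom_endpoints path source target → Spec_endpoints path source target (endpoints path source target)

-- ===== LEMMAS AND PROOFS =====
-- loop invariant: while the loop is still running, found (= t0 && t1) is false,
-- and the result equals "each flag already set, or set by some remaining element"
theorem endpointsLoop_eq (source target : String) (path : List String) :
    ∀ t0 t1 : Bool, (t0 && t1) = false →
      endpointsLoop source target path t0 t1 =
        ((t0 || path.any (fun e => PySem.Str.isIn source e)) &&
         (t1 || path.any (fun e => PySem.Str.isIn target e))) := by
  induction path with
  | nil => intro t0 t1 h; simp [endpointsLoop, h]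
  | cons e rest ih =>
      intro t0 t1 h
      simp only [endpointsLoop, List.any_cons]
      by_cases h0 : PySem.Str.isIn source e <;>
        by_cases h1 : PySem.Str.isIn target e <;>
        cases t0 <;> cases t1 <;>
        simp_all

-- ===== VERDICT (by name: the statement is the Claim_ definition above) =====
theorem endpoints_spec : Claim_equal_endpoints := by
  intro path source target _
  unfold Spec_endpoints endpoints endpoints_alt
  simp [endpointsLoop_eq source target path false false rfl]
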